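-- pv_equiv track=rewrite | github.com/miliar/Code_Jam_Webscraper | solutions_python/Problem_178/1493.py | yum
-- ===== SOURCE A (Python) =====
-- def yum (p):
--     prev = 0;
--     norm = "";
--     for c in p:
--         if (c != prev):
--             norm = norm + c
--             prev = c
--     if (norm[-1] == '+'):
--         norm = norm[:-1]
--     return len(norm)
-- ===== SOURCE B (Python) =====
-- def yum(p):
--     # Count runs numerically: 1 + number of adjacent differing pairs,
--     # minus one if the last character is '+' (raises IndexError on "" like A).
--     runs = 1 + sum(1 for a, b in zip(p, p[1:]) if a != b)
--     return runs - (1 if p[-1] == '+' else 0)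
-- ===== Notes on version B (the rewrite author's own statement) =====
-- stated objective: simpler
-- what changed: B never builds the collapsed string: it counts runs as 1 + number of adjacent differing character pairs and subtracts 1 when the last character is '+', keeping only a counter.
import Mathlib
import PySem

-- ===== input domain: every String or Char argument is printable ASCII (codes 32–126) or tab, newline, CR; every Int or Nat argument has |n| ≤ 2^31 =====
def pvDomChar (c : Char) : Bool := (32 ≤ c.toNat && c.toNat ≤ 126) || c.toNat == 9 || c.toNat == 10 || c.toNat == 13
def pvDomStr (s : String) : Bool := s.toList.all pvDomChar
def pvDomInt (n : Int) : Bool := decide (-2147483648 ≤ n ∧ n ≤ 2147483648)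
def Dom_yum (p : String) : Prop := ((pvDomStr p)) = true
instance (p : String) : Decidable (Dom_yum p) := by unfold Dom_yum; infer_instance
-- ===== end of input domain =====

-- B replaces A's string building by a pure counter: runs = 1 + adjacent differing
-- pairs, minus one if the last character is '+' (simpler; return value only).

-- ===== PORT A =====
-- A's `prev` starts as the int 0, so `c != prev` is always true on the first
-- character: modeled exactly by `Option Char` with `none` as the sentinel.
def yumStep (st : Option Char × List Char) (c : Char) : Option Char × List Char :=
  if st.1 ≠ some c then (some c, st.2 ++ [c]) else st

def yum (p : String) : Int :=
  let norm := (p.toList.foldl yumStep (none, [])).2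
  match PySem.List.pyGet? norm (-1) with
  | some c =>
      if c = '+' then ((PySem.List.slice norm none (some (-1))).length : Int)
      else (norm.length : Int)
  | none => 0   -- norm[-1] is an IndexError in Python (empty p); excluded by Pre_yum

-- ===== PORT B =====
def yum_alt (p : String) : Int :=
  let cs := p.toList
  let runs : Int := 1 + ((cs.zip cs.tail).countP (fun ab => ab.1 != ab.2) : Int)
  runs - (if PySem.Str.pyGet? p (-1) = some '+' then 1 else 0)

-- ===== PRECONDITION & SPEC =====
-- Pre_ excludes only the empty string, on which A raises IndexError at norm[-1].
def Pre_yum (p : String) : Prop := p.toList ≠ []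
instance (p : String) : Decidable (Pre_yum p) := by unfold Pre_yum; infer_instance
def pvWitness_yum : String := "a++b"

def Spec_yum (p : String) (out : Int) : Prop := out = yum_alt p
instance (p : String) (out : Int) : Decidable (Spec_yum p out) := by unfold Spec_yum; infer_instance

-- ===== CLAIM (what is proved, stated in full; the proofs are below) =====
def Claim_equal_yum : Prop := ∀ (p : String), Dom_yum p → Pre_yum p → Spec_yum p (yum p)

-- ===== LEMMAS AND PROOFS =====

lemma loop_spec (rest : List Char) : ∀ (prev : Char) (acc : List Char),
    acc.getLast? = some prev →
    (rest.foldl yumStep (some prev, acc)).2.length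
        = acc.length + ((prev :: rest).zip rest).countP (fun ab => ab.1 != ab.2)
    ∧ (rest.foldl yumStep (some prev, acc)).2.getLast?
        = (prev :: rest).getLast? := by
  induction rest with
  | nil => intro prev acc h; simp [h]
  | cons c rest ih =>
    intro prev acc h
    by_cases hpc : prev = c
    · subst hpc
      have := ih prev acc h
      simpa [yumStep, List.countP_cons, List.getLast?_cons_cons] using this
    · have := ih c (acc ++ [c]) (by simp)
      simp only [List.foldl_cons, yumStep, List.length_append] at this ⊢
      rw [if_pos (by simpa using hpc)]
      refine ⟨?_, ?_⟩
      · rw [this.1]; simp [hpc]; omega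
      · rw [this.2]; simp [List.getLast?_cons_cons]

theorem yum_spec : Claim_equal_yum := by
  intro p _ hp
  unfold Spec_yum yum yum_alt
  obtain ⟨c, rest, hcs⟩ : ∃ c rest, p.toList = c :: rest := by
    cases h : p.toList with
    | nil => exact absurd h hp
    | cons c rest => exact ⟨c, rest, rfl⟩
  have hstep : (c :: rest).foldl yumStep (none, []) = rest.foldl yumStep (some c, [c]) := by
    simp [yumStep]
  obtain ⟨hlen, hlast⟩ := loop_spec rest c [c] (by simp)
  set norm := (rest.foldl yumStep (some c, [c])).2 with hnorm
  have hlen' : norm.length = 1 + ((c :: rest).zip rest).countP (fun ab => ab.1 != ab.2) := by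
    simpa using hlen
  have hne : norm ≠ [] := by
    intro h; rw [h] at hlen'; simp at hlen'; omega
  have hget : PySem.List.pyGet? norm (-1) = norm.getLast? := PySem.List.pyGet?_neg_one norm
  have hgetp : PySem.Str.pyGet? p (-1) = (c :: rest).getLast? := by
    rw [← hcs]
    simpa using PySem.List.pyGet?_neg_one p.toList
  have hlastp : norm.getLast? = (c :: rest).getLast? := hlast
  rw [hcs, hstep, ← hnorm]
  simp only [hget, hlastp, hgetp, List.tail_cons]
  rcases hL : ((c :: rest).getLast?) with _ | d
  · simp at hL
  · by_cases hd : d = '+'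
    · subst hd
      simp only [PySem.List.slice_to_neg_one, List.length_dropLast, hlen']
      push_cast
      omega
    · simp only [hd, if_false, if_neg (by simp [hd] : ¬ some d = some '+'), hlen']
      push_cast
      ring
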